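-- pv_equiv track=rewrite | github.com/cd2420/algorithm_practice | greedy/startSequence.py | solution
-- ===== SOURCE A (Python) =====
-- from collections import Counter
--
-- def solution(a):
--
--     answer = 0
--     counter = Counter(a)
--
--     for k in counter.keys():
--
--         if counter[k] <= answer:
--             continue
--         target = k
--         idx = 0
--         tmp = 0
--         while idx < len(a)-1:
--             now = a[idx]
--             if now != target:
--                 if a[idx+1] == target:
--                     tmp += 1
--                     idx += 2
--                 else:
--                     idx += 1
--             else:
--                 if a[idx+1] != target:
--                     tmp += 1
--                     idx += 2
--                 else:
--                     idx += 1
--         answer = max(tmp, answer)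
--     return answer * 2 if answer != 0 else 0
-- ===== SOURCE B (Python) =====
-- from collections import Counter
--
-- def _best(a, t):
--     # suffix DP: next1 = best matching of a[i+1:], next2 = best of a[i+2:]
--     next1 = 0
--     next2 = 0
--     for i in range(len(a) - 2, -1, -1):
--         cur = next1
--         if (a[i] == t) != (a[i + 1] == t):
--             cur = max(cur, next2 + 1)
--         next2, next1 = next1, cur
--     return next1
--
-- def solution(a):
--     answer = 0
--     counter = Counter(a)
--     for k in counter.keys():
--         if counter[k] <= answer:
--             continue
--         answer = max(_best(a, k), answer)
--     return answer * 2 if answer != 0 else 0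
-- ===== Notes on version B (the rewrite author's own statement) =====
-- stated objective: alternative
-- what changed: The inner index-skipping greedy (advance by 1 or 2, counting taken pairs) is replaced by a take-or-skip dynamic program over adjacent edges, computed as a backward rolling suffix-DP (maximum matching of valid adjacent pairs).
import Mathlib
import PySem

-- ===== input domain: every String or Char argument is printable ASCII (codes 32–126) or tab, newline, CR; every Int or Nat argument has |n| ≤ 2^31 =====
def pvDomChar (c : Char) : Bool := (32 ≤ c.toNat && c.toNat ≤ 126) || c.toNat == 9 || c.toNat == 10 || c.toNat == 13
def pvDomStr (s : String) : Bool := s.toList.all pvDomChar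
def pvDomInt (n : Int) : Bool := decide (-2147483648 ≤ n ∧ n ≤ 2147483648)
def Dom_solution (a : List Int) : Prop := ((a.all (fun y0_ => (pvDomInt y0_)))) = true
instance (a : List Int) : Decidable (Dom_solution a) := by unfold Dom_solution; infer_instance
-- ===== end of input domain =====

-- B replaces A's inner index-skipping greedy scan by a backward rolling suffix-DP
-- (take-or-skip maximum matching of valid adjacent pairs); alternative decomposition, same cost.

-- ===== PORT A =====
-- A's while-loop: idx advances by 1 or 2; indices idx, idx+1 are always in range
-- (idx < len a - 1), so List.getD is exact for Python's a[idx] / a[idx+1] here.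
def solLoopA (a : List Int) (target : Int) (idx : Nat) (tmp : Int) : Int :=
  if h : (idx : Int) < (a.length : Int) - 1 then
    let now := a.getD idx 0
    if now ≠ target then
      if a.getD (idx + 1) 0 = target then solLoopA a target (idx + 2) (tmp + 1)
      else solLoopA a target (idx + 1) tmp
    else
      if a.getD (idx + 1) 0 ≠ target then solLoopA a target (idx + 2) (tmp + 1)
      else solLoopA a target (idx + 1) tmp
  else tmp
termination_by a.length - idx
decreasing_by all_goals omega

def solution (a : List Int) : Int :=
  let counter := PySem.Dict.counter a
  let answer := counter.keys.foldl (fun answer k =>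
    if counter.getD k 0 ≤ answer then answer
    else max (solLoopA a k 0 0) answer) 0
  if answer ≠ 0 then answer * 2 else 0

-- ===== PORT B =====
-- Source B's backward rolling scan: (bestPair t xs).1 = next1 = best over suffix xs,
-- (bestPair t xs).2 = next2 = best over the suffix one step shorter.
def bestPair (t : Int) : List Int → Int × Int
  | [] => (0, 0)
  | [_] => (0, 0)
  | x :: y :: rest =>
    let p := bestPair t (y :: rest)
    let cur := if (x == t) != (y == t) then max p.1 (p.2 + 1) else p.1
    (cur, p.1)

def solution_alt (a : List Int) : Int :=
  let counter := PySem.Dict.counter a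
  let answer := counter.keys.foldl (fun answer k =>
    if counter.getD k 0 ≤ answer then answer
    else max (bestPair k a).1 answer) 0
  if answer ≠ 0 then answer * 2 else 0

-- ===== PRECONDITION & SPEC =====
def Spec_solution (a : List Int) (out : Int) : Prop := out = solution_alt a
instance (a : List Int) (out : Int) : Decidable (Spec_solution a out) := by unfold Spec_solution; infer_instance

-- ===== CLAIM (what is proved, stated in full; the proofs are below) =====
def Claim_equal_solution : Prop := ∀ (a : List Int), Dom_solution a → Spec_solution a (solution a)

-- ===== LEMMAS AND PROOFS =====

-- Greedy recursion equivalent to A's while loop, phrased on the list.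
def gG (t : Int) : List Int → Int
  | x :: y :: rest => if (x == t) != (y == t) then 1 + gG t rest else gG t (y :: rest)
  | _ => 0

theorem bestPair_snd (t y : Int) (rest : List Int) :
    (bestPair t (y :: rest)).2 = (bestPair t rest).1 := by
  cases rest <;> simp [bestPair]

theorem bestPair_mono (t z : Int) (xs : List Int) :
    (bestPair t xs).1 ≤ (bestPair t (z :: xs)).1 := by
  cases xs with
  | nil => simp [bestPair]
  | cons w ws =>
    simp only [bestPair]
    split <;> simp

theorem bestPair_bound (t y : Int) (rest : List Int) :
    (bestPair t (y :: rest)).1 ≤ (bestPair t rest).1 + 1 := by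
  cases rest with
  | nil => simp [bestPair]
  | cons z rs =>
    have hm := bestPair_mono t z rs
    simp only [bestPair, bestPair_snd]
    split <;> omega

theorem gG_eq_bestPair (t : Int) : ∀ (n : Nat) (xs : List Int), xs.length ≤ n →
    gG t xs = (bestPair t xs).1 := by
  intro n
  induction n with
  | zero =>
    intro xs h
    have : xs = [] := List.length_eq_zero_iff.mp (Nat.le_zero.mp h)
    subst this; rfl
  | succ n ih =>
    intro xs h
    match xs with
    | [] => rfl
    | [x] => rfl
    | x :: y :: rest =>
      have hr : rest.length ≤ n := by simp at h; omega
      have hyr : (y :: rest).length ≤ n := by simp at h ⊢; omega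
      have hb := bestPair_bound t y rest
      simp only [gG, bestPair, bestPair_snd]
      split
      · rw [ih _ hr]; omega
      · exact ih _ hyr

theorem solLoopA_eq (a : List Int) (t : Int) :
    ∀ (n idx : Nat) (tmp : Int), a.length - idx ≤ n →
    solLoopA a t idx tmp = tmp + gG t (a.drop idx) := by
  intro n
  induction n with
  | zero =>
    intro idx tmp h
    rw [solLoopA]
    have hlen : a.length ≤ idx := by omega
    rw [dif_neg (by omega)]
    rw [List.drop_eq_nil_of_le hlen]
    simp [gG]
  | succ n ih =>
    intro idx tmp h
    rw [solLoopA]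
    by_cases hlt : (idx : Int) < (a.length : Int) - 1
    · rw [dif_pos hlt]
      have h1 : idx + 1 < a.length := by omega
      have h0 : idx < a.length := by omega
      have hdrop : a.drop idx = a[idx] :: a[idx+1] :: a.drop (idx + 2) := by
        rw [List.drop_eq_getElem_cons h0, List.drop_eq_getElem_cons h1]
      have hd0 : a.getD idx 0 = a[idx] := List.getD_eq_getElem a 0 h0
      have hd1 : a.getD (idx + 1) 0 = a[idx+1] := List.getD_eq_getElem a 0 h1
      have hdrop1 : a.drop (idx + 1) = a[idx+1] :: a.drop (idx + 2) :=
        List.drop_eq_getElem_cons h1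
      have ih2 := ih (idx + 2) (tmp + 1) (by omega)
      have ih1 := ih (idx + 1) tmp (by omega)
      rw [hdrop]
      simp only [hd0, hd1, gG, hdrop1, ih1, ih2, bne_iff_ne, ne_eq]
      by_cases c0 : a[idx] = t <;> by_cases c1 : a[idx+1] = t <;>
        simp [c0, c1] <;> omega
    · rw [dif_neg hlt]
      have : a.length ≤ idx + 1 := by omega
      rcases Nat.lt_or_ge idx a.length with hc | hc
      · have : a.drop idx = [a[idx]] := by
          rw [List.drop_eq_getElem_cons hc, List.drop_eq_nil_of_le (by omega)]
        simp [this, gG]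
      · rw [List.drop_eq_nil_of_le hc]; simp [gG]

theorem inner_eq (a : List Int) (k : Int) : solLoopA a k 0 0 = (bestPair k a).1 := by
  rw [solLoopA_eq a k a.length 0 0 (by omega)]
  simp [gG_eq_bestPair k a.length a le_rfl]

-- ===== VERDICT (by name: the statement is the Claim_ definition above) =====
theorem solution_spec : Claim_equal_solution := by
  intro a _
  unfold Spec_solution solution solution_alt
  simp only []
  have hfold : List.foldl
      (fun answer k => if (PySem.Dict.counter a).getD k 0 ≤ answer then answer
        else max (solLoopA a k 0 0) answer) 0 (PySem.Dict.counter a).keys =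
    List.foldl
      (fun answer k => if (PySem.Dict.counter a).getD k 0 ≤ answer then answer
        else max (bestPair k a).1 answer) 0 (PySem.Dict.counter a).keys := by
    apply PySem.List.foldl_congr_mem
    intro acc k _
    rw [inner_eq]
  rw [hfold]
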